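-- pv_equiv track=rewrite | github.com/greatertomi/problem-solving | codility-challenges/replacing-books.py | calculateReplacement
-- ===== SOURCE A (Python) =====
-- def calculateReplacement(arr, k):
--     count = 0
--     for num in range(arr[0], arr[-1] + 1):
--         if num in arr:
--             count += 1
--         elif num not in arr and k > 0:
--             count += 1
--             k -= 1
--         else:
--             break
--     if k > 0:
--         count += k
--     return count
-- ===== SOURCE B (Python) =====
-- def calculateReplacement(arr, k):
--     lo, hi = arr[0], arr[-1]
--     rem = k if k > 0 else 0
--     if lo > hi:
--         return rem
--     vals = sorted({x for x in arr if lo <= x <= hi})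
--     prev = lo - 1
--     for x in vals:
--         gap = x - prev - 1
--         if gap <= rem:
--             rem -= gap
--             prev = x
--         else:
--             return prev + 1 + rem - lo
--     return hi - lo + 1 + rem
-- ===== Notes on version B (the rewrite author's own statement) =====
-- stated objective: faster
-- what changed: Instead of walking every integer of the range and scanning the whole list for membership at each step (O(R*n)), B sorts the distinct in-range elements once and walks only the gaps between consecutive elements, deducting each gap from the filler budget k (O(n log n), independent of the value range R).
import Mathlib
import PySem

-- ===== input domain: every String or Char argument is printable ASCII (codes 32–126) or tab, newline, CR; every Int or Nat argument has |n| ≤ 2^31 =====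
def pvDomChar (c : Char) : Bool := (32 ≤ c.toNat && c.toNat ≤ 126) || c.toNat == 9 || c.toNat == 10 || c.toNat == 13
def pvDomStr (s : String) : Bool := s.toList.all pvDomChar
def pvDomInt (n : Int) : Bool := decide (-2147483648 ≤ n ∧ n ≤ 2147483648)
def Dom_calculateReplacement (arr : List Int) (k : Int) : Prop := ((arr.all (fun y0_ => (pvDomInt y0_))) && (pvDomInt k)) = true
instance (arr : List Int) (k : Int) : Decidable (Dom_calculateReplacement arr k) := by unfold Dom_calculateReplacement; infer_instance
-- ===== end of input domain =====

-- B replaces A's O(R*n) value-by-value walk with membership scans by a single sort of the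
-- distinct in-range elements followed by an O(n) walk over the gaps between neighbours.

-- ===== PORT A =====
-- A's 'for num in range(a0, al+1)' with break, recursion on num (lazy like Python's
-- range); returns (count, k) at exit (break or range end).
def pvALoop (arr : List Int) (num stop : Int) (k count : Int) : Int × Int :=
  if _h : num < stop then
    if arr.contains num then pvALoop arr (num + 1) stop k (count + 1)
    else if ¬ arr.contains num ∧ k > 0 then pvALoop arr (num + 1) stop (k - 1) (count + 1)
    else (count, k)
  else (count, k)
termination_by (stop - num).toNat
decreasing_by all_goals omega

def calculateReplacement (arr : List Int) (k : Int) : Int :=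
  match PySem.List.pyGet? arr 0, PySem.List.pyGet? arr (-1) with
  | some a0, some al =>
    let ck := pvALoop arr a0 (al + 1) k 0
    if ck.2 > 0 then ck.1 + ck.2 else ck.1
  | _, _ => 0  -- arr = []: Python raises IndexError (excluded by Pre_)

-- ===== PORT B =====
def pvBLoop : List Int → Int → Int → Int → Int → Int
  | [], _, rem, lo, hi => hi - lo + 1 + rem
  | x :: xs, prev, rem, lo, hi =>
    let gap := x - prev - 1
    if gap ≤ rem then pvBLoop xs x (rem - gap) lo hi
    else prev + 1 + rem - lo

def calculateReplacement_alt (arr : List Int) (k : Int) : Int :=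
  match (PySem.List.pyGet? arr 0).bind (fun lo => (PySem.List.pyGet? arr (-1)).map (fun hi => (lo, hi))) with
  | some (lo, hi) =>
    let rem := if k > 0 then k else 0
    if lo > hi then rem
    else
      let vals := PySem.List.sorted
        (PySem.Set.ofList (arr.filter (fun x => lo ≤ x && x ≤ hi))) (fun x => x) false
      pvBLoop vals (lo - 1) rem lo hi
  | none => 0  -- arr = []: Python raises IndexError (excluded by Pre_)

-- ===== PRECONDITION & SPEC =====
-- Pre_ excludes only arr = [], on which the Python A raises IndexError (arr[0]).
def Pre_calculateReplacement (arr : List Int) (_k : Int) : Prop := arr ≠ []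
instance (arr : List Int) (k : Int) : Decidable (Pre_calculateReplacement arr k) := by
  unfold Pre_calculateReplacement; infer_instance

def pvWitness_calculateReplacement : List Int × Int := ([1, 3, 4], 1)

def Spec_calculateReplacement (arr : List Int) (k : Int) (out : Int) : Prop := out = calculateReplacement_alt arr k
instance (arr : List Int) (k : Int) (out : Int) : Decidable (Spec_calculateReplacement arr k out) := by unfold Spec_calculateReplacement; infer_instance

-- ===== CLAIM (what is proved, stated in full; the proofs are below) =====
def Claim_equal_calculateReplacement : Prop := ∀ (arr : List Int) (k : Int), Dom_calculateReplacement arr k → Pre_calculateReplacement arr k → Spec_calculateReplacement arr k (calculateReplacement arr k)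

-- ===== LEMMAS AND PROOFS =====

-- helper for proofs: the value A finally returns from loop state (count, k)
def pvFinal (ck : Int × Int) : Int := if ck.2 > 0 then ck.1 + ck.2 else ck.1

-- A's loop with k ≤ 0 behaves like k = 0 and never changes k
theorem pvALoop_nonpos (arr : List Int) (stop : Int) : ∀ (n : Nat) (num k c : Int),
    (stop - num).toNat = n → k ≤ 0 →
    pvALoop arr num stop k c = ((pvALoop arr num stop 0 c).1, k) := by
  intro n
  induction n with
  | zero =>
    intro num k c hn hk
    conv_lhs => rw [pvALoop]
    conv_rhs => rw [pvALoop]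
    rw [dif_neg (by omega), dif_neg (by omega)]
  | succ m ih =>
    intro num k c hn hk
    conv_lhs => rw [pvALoop]
    conv_rhs => rw [pvALoop]
    rw [dif_pos (by omega), dif_pos (by omega)]
    by_cases hc : arr.contains num
    · rw [if_pos hc, if_pos hc]
      exact ih (num + 1) k (c + 1) (by omega) hk
    · rw [if_neg hc, if_neg hc, if_neg (fun h => absurd h.2 (by omega)),
        if_neg (fun h => absurd h.2 (by omega))]

-- A consumes a block of `gap` consecutive missing values
theorem pvBlock (arr : List Int) (hi : Int) : ∀ (gap : Nat) (p rem c : Int),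
    0 ≤ rem → p + gap ≤ hi →
    (∀ m : Int, p < m → m < p + 1 + gap → m ∉ arr) →
    pvALoop arr (p+1) (hi+1) rem c =
      if (gap : Int) ≤ rem then
        pvALoop arr (p+1+gap) (hi+1) (rem - gap) (c + gap)
      else (c + rem, 0) := by
  intro gap
  induction gap with
  | zero => intro p rem c hrem _ _; simp [hrem]
  | succ g ih =>
    intro p rem c hrem hle hmiss
    have hmem : (p+1) ∉ arr := hmiss (p+1) (by omega) (by push_cast; omega)
    have hcont : ¬ arr.contains (p+1) := by simpa using hmem
    by_cases hr : rem > 0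
    · have step : pvALoop arr (p+1) (hi+1) rem c
          = pvALoop arr ((p+1)+1) (hi+1) (rem-1) (c+1) := by
        rw [pvALoop, dif_pos (by push_cast at hle; omega), if_neg hcont,
          if_pos ⟨hcont, hr⟩]
      rw [step, ih (p+1) (rem-1) (c+1) (by omega) (by push_cast at hle ⊢; omega)
            (by intro m h1 h2; exact hmiss m (by omega) (by push_cast at h2 ⊢; omega))]
      push_cast
      by_cases hcond : (g : Int) ≤ rem - 1
      · rw [if_pos hcond, if_pos (by omega)]
        have e1 : p + 1 + 1 + (g:Int) = p + 1 + ((g:Int)+1) := by ring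
        have e2 : rem - 1 - (g:Int) = rem - ((g:Int)+1) := by ring
        have e3 : c + 1 + (g:Int) = c + ((g:Int)+1) := by ring
        rw [e1, e2, e3]
      · rw [if_neg hcond, if_neg (by omega)]
        have : c + 1 + (rem - 1) = c + rem := by ring
        rw [this]
    · have hr0 : rem = 0 := by omega
      subst hr0
      rw [pvALoop, dif_pos (by push_cast at hle; omega), if_neg hcont,
        if_neg (by simp), if_neg (by push_cast; omega)]
      simp

-- A steps over a present value, counting it
theorem pvMemStep (arr : List Int) (hi x rem c : Int) (hx : x ∈ arr) (hxle : x ≤ hi) :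
    pvALoop arr x (hi+1) rem c = pvALoop arr (x+1) (hi+1) rem (c+1) := by
  rw [pvALoop, dif_pos (by omega), if_pos (by simpa using hx)]

-- main invariant: walking the gaps of the sorted distinct tail equals A's remaining walk
theorem pvMain (arr : List Int) (lo hi : Int) : ∀ (vals : List Int) (p rem c : Int),
    0 ≤ rem → p ≤ hi →
    vals.Pairwise (· < ·) →
    (∀ x ∈ vals, p < x ∧ x ≤ hi) →
    (∀ m : Int, p < m → m ≤ hi → (m ∈ arr ↔ m ∈ vals)) →
    (p = hi ∨ hi ∈ vals) →
    pvFinal (pvALoop arr (p+1) (hi+1) rem c)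
      = c + pvBLoop vals p rem lo hi - (p + 1 - lo) := by
  intro vals
  induction vals with
  | nil =>
    intro p rem c hrem hphi _ _ _ hlast
    have hp : p = hi := by rcases hlast with h | h; exact h; simp at h
    subst hp
    rw [pvALoop, dif_neg (by omega)]
    simp only [pvBLoop, pvFinal]
    split_ifs with h <;> omega
  | cons x xs ih =>
    intro p rem c hrem hphi hpw hbnd hmem hlast
    obtain ⟨hpx, hxhi⟩ := hbnd x (by simp)
    have hxs_lt : ∀ m ∈ xs, x < m := (List.pairwise_cons.mp hpw).1
    set g : Nat := (x - p - 1).toNat with hgdef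
    have hg : (g : Int) = x - p - 1 := Int.toNat_of_nonneg (by omega)
    have hmiss : ∀ m : Int, p < m → m < p + 1 + g → m ∉ arr := by
      intro m h1 h2 hmarr
      have hmx : m < x := by omega
      rcases List.mem_cons.mp ((hmem m h1 (by omega)).mp hmarr) with h | h
      · omega
      · exact absurd (hxs_lt m h) (by omega)
    rw [pvBlock arr hi g p rem c hrem (by omega) hmiss]
    by_cases hcond : (g : Int) ≤ rem
    · rw [if_pos hcond]
      have ex : p + 1 + (g : Int) = x := by omega
      rw [ex]
      have hxarr : x ∈ arr := (hmem x hpx hxhi).mpr (by simp)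
      rw [pvMemStep arr hi x (rem - g) (c + g) hxarr hxhi]
      rw [ih x (rem - g) (c + g + 1) (by omega) hxhi (List.pairwise_cons.mp hpw).2
            (by intro y hy; exact ⟨hxs_lt y hy, (hbnd y (by simp [hy])).2⟩)
            (by
              intro m h1 h2
              constructor
              · intro hm
                rcases List.mem_cons.mp ((hmem m (by omega) h2).mp hm) with h | h
                · omega
                · exact h
              · intro hm
                exact (hmem m (by omega) h2).mpr (by simp [hm]))
            (by
              rcases hlast with h | h
              · omega
              · rcases List.mem_cons.mp h with h | h
                · left; omega
                · right; exact h)]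
      have hb : pvBLoop (x :: xs) p rem lo hi = pvBLoop xs x (rem - (x - p - 1)) lo hi := by
        simp only [pvBLoop]
        rw [if_pos (by omega)]
      rw [hb]
      have eg : rem - (g:Int) = rem - (x - p - 1) := by omega
      rw [eg]
      set B := pvBLoop xs x (rem - (x - p - 1)) lo hi
      omega
    · rw [if_neg hcond]
      have hb : pvBLoop (x :: xs) p rem lo hi = p + 1 + rem - lo := by
        simp only [pvBLoop]
        rw [if_neg (by omega)]
      rw [hb]
      simp only [pvFinal]
      split_ifs with h <;> omega


theorem pvFinal_if (e : Int × Int) : (if e.2 > 0 then e.1 + e.2 else e.1) = pvFinal e := rfl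

theorem pvTop : ∀ (arr : List Int) (k : Int), Pre_calculateReplacement arr k →
    calculateReplacement arr k = calculateReplacement_alt arr k := by
  intro arr k hne
  obtain ⟨a, as, rfl⟩ := List.exists_cons_of_ne_nil hne
  have hnil : (a :: as) ≠ [] := by simp
  have h0 : PySem.List.pyGet? (a :: as) 0 = some a := by simp
  have h1 : PySem.List.pyGet? (a :: as) (-1) = some ((a :: as).getLast hnil) := by
    rw [PySem.List.pyGet?_neg_one, List.getLast?_eq_some_getLast]
  set hi := (a :: as).getLast hnil with hhi
  simp only [calculateReplacement, calculateReplacement_alt, h0, h1, Option.map_some]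
  rw [show ((some a).bind fun lo => some (lo, hi)) = some (a, hi) from rfl]
  simp only []
  by_cases hlohi : a > hi
  · rw [if_pos hlohi, pvALoop, dif_neg (by omega)]
    split_ifs <;> omega
  · rw [if_neg hlohi]
    have hale : a ≤ hi := by omega
    set rem : Int := if k > 0 then k else 0 with hremdef
    have hrem0 : 0 ≤ rem := by rw [hremdef]; split_ifs <;> omega
    set vals := PySem.List.sorted
      (PySem.Set.ofList ((a :: as).filter (fun x => a ≤ x && x ≤ hi))) (fun x => x) false with hvals
    have hmemv : ∀ m : Int, m ∈ vals ↔ m ∈ (a :: as) ∧ a ≤ m ∧ m ≤ hi := by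
      intro m
      rw [hvals, PySem.List.mem_sorted, PySem.Set.mem_ofList, List.mem_filter]
      simp
    have hkey : pvFinal (pvALoop (a :: as) a (hi + 1) rem 0)
        = pvBLoop vals (a - 1) rem a hi := by
      have := pvMain (a :: as) a hi vals (a - 1) rem 0 hrem0 (by omega)
        (PySem.List.sorted_ofList_pairwise_lt _)
        (by intro x hx; have := (hmemv x).mp hx; exact ⟨by omega, this.2.2⟩)
        (by intro m h1 h2; rw [hmemv m]; constructor
            · intro hm; exact ⟨hm, by omega, h2⟩
            · intro hm; exact hm.1)
        (Or.inr ((hmemv hi).mpr ⟨List.getLast_mem hnil, hale, le_refl hi⟩))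
      rw [show a - 1 + 1 = a by ring] at this
      rw [this]
      ring
    rw [pvFinal_if]
    by_cases hk : k > 0
    · have : rem = k := by rw [hremdef, if_pos hk]
      rw [← this] at *
      exact hkey
    · have hk0 : k ≤ 0 := by omega
      have hr0 : rem = 0 := by rw [hremdef, if_neg hk]
      have e1 := pvALoop_nonpos (a :: as) (hi + 1) (hi + 1 - a).toNat a k 0 rfl hk0
      have e2 := pvALoop_nonpos (a :: as) (hi + 1) (hi + 1 - a).toNat a 0 0 rfl (le_refl 0)
      have e11 : (pvALoop (a :: as) a (hi + 1) k 0).1 = (pvALoop (a :: as) a (hi + 1) 0 0).1 := by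
        rw [e1]
      have e12 : (pvALoop (a :: as) a (hi + 1) k 0).2 = k := by rw [e1]
      have e22 : (pvALoop (a :: as) a (hi + 1) 0 0).2 = 0 := by rw [e2]
      rw [← hkey, hr0]
      simp only [pvFinal]
      split_ifs with c1 c2 <;> omega

-- ===== VERDICT (by name: the statement is the Claim_ definition above) =====
theorem calculateReplacement_spec : Claim_equal_calculateReplacement := by
  intro arr k _ hpre
  unfold Spec_calculateReplacement
  exact pvTop arr k hpre
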